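-- pv_equiv track=rewrite | github.com/zFa3/CP_problems | 2024S2.py | get_heavy
-- ===== SOURCE A (Python) =====
-- def get_heavy(string):
--     temp = []
--     heavy = []
--     for i in string:
--         if not i in temp:
--             temp.append(i)
--         elif not i in heavy:
--             heavy.append(i)
--         else:
--             pass
--     return heavy
-- ===== SOURCE B (Python) =====
-- def get_heavy(string):
--     # A char belongs to the result exactly at its second occurrence:
--     # position i where the prefix before i contains it exactly once.
--     return [c for i, c in enumerate(string) if string[:i].count(c) == 1]
-- ===== Notes on version B (the rewrite author's own statement) =====
-- stated objective: simpler
-- what changed: Replaces A's stateful two-list (seen-once/seen-twice) scan with a stateless comprehension: keep the char at position i exactly when the prefix string[:i] contains it exactly once.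
import Mathlib
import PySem

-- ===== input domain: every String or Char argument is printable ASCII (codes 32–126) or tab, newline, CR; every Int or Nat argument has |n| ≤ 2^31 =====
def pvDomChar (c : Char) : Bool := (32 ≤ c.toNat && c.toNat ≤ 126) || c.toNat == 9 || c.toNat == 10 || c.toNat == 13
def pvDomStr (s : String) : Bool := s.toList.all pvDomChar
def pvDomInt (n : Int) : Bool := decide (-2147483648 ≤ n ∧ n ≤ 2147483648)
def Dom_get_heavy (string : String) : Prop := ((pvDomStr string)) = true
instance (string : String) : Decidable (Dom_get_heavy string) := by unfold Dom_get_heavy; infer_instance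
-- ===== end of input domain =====

-- B replaces A's stateful two-list scan by a stateless comprehension: a char is kept
-- exactly at the position whose preceding prefix contains it exactly once (simpler).

-- ===== PORT A =====
def get_heavy (string : String) : List String :=
  (string.toList.foldl (fun (st : List Char × List Char) i =>
    if i ∉ st.1 then (st.1 ++ [i], st.2)
    else if i ∉ st.2 then (st.1, st.2 ++ [i])
    else st) ([], [])).2.map (fun c => String.ofList [c])

-- ===== PORT B =====
def get_heavy_alt (string : String) : List String :=
  ((PySem.List.enumerate string.toList 0).filter
    (fun p => (PySem.List.slice string.toList none (some p.1)).count p.2 == 1)).map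
    (fun p => String.ofList [p.2])

-- ===== PRECONDITION & SPEC =====
def Spec_get_heavy (string : String) (out : List String) : Prop := out = get_heavy_alt string
instance (string : String) (out : List String) : Decidable (Spec_get_heavy string out) := by unfold Spec_get_heavy; infer_instance

-- ===== CLAIM (what is proved, stated in full; the proofs are below) =====
def Claim_equal_get_heavy : Prop := ∀ (string : String), Dom_get_heavy string → Spec_get_heavy string (get_heavy string)

-- ===== LEMMAS AND PROOFS =====

/-- Second-occurrence recursion: chars of `l` whose count in the growing prefix is 1. -/
def hvAux : List Char → List Char → List Char
  | _, [] => []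
  | p, c :: l => (if p.count c = 1 then [c] else []) ++ hvAux (p ++ [c]) l

theorem hvAux_foldl (l : List Char) (p temp heavy : List Char)
    (ht : ∀ c : Char, c ∈ temp ↔ 1 ≤ p.count c)
    (hh : ∀ c : Char, c ∈ heavy ↔ 2 ≤ p.count c) :
    (l.foldl (fun (st : List Char × List Char) i =>
      if i ∉ st.1 then (st.1 ++ [i], st.2)
      else if i ∉ st.2 then (st.1, st.2 ++ [i])
      else st) (temp, heavy)).2 = heavy ++ hvAux p l := by
  induction l generalizing p temp heavy with
  | nil => simp [hvAux]
  | cons c l ih =>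
    have hcnt : ∀ x : Char, (p ++ [c]).count x = p.count x + (if x = c then 1 else 0) := by
      intro x; by_cases hx : x = c
      · subst hx; simp [List.count_append]
      · have hx' : ¬ c = x := fun h => hx h.symm
        simp [List.count_append, hx', hx]
    simp only [List.foldl_cons, hvAux]
    by_cases hct : c ∈ temp
    · have h1 : 1 ≤ p.count c := (ht c).mp hct
      by_cases hch : c ∈ heavy
      · -- third+ occurrence
        have h2 : 2 ≤ p.count c := (hh c).mp hch
        rw [if_neg (by simp [hct]), if_neg (by simp [hch])]
        rw [if_neg (by omega)]
        simp only [List.nil_append]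
        apply ih
        · intro x; rw [ht x, hcnt x]
          by_cases hx : x = c
          · subst hx; rw [if_pos rfl]; omega
          · rw [if_neg hx, Nat.add_zero]
        · intro x; rw [hh x, hcnt x]
          by_cases hx : x = c
          · subst hx; rw [if_pos rfl]; omega
          · rw [if_neg hx, Nat.add_zero]
      · -- second occurrence
        have h2 : ¬ 2 ≤ p.count c := fun h => hch ((hh c).mpr h)
        have hc1 : p.count c = 1 := by omega
        rw [if_neg (by simp [hct]), if_pos (by simp [hch]), if_pos hc1]
        rw [ih (p ++ [c]) temp (heavy ++ [c]) ?_ ?_]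
        · simp
        · intro x; rw [ht x, hcnt x]
          by_cases hx : x = c
          · subst hx; rw [if_pos rfl]; omega
          · rw [if_neg hx, Nat.add_zero]
        · intro x
          rw [List.mem_append, hh x, hcnt x, List.mem_singleton]
          by_cases hx : x = c
          · subst hx; rw [if_pos rfl]
            exact ⟨fun _ => by omega, fun _ => Or.inr rfl⟩
          · rw [if_neg hx, Nat.add_zero, or_iff_left hx]
    · -- first occurrence
      have h0 : p.count c = 0 := by
        by_contra h; exact hct ((ht c).mpr (by omega))
      rw [if_pos (by simp [hct]), if_neg (by omega)]
      simp only [List.nil_append]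
      apply ih
      · intro x
        rw [List.mem_append, ht x, hcnt x, List.mem_singleton]
        by_cases hx : x = c
        · subst hx; rw [if_pos rfl]
          exact ⟨fun _ => by omega, fun _ => Or.inr rfl⟩
        · rw [if_neg hx, Nat.add_zero, or_iff_left hx]
      · intro x; rw [hh x, hcnt x]
        by_cases hx : x = c
        · subst hx; rw [if_pos rfl]; omega
        · rw [if_neg hx, Nat.add_zero]

theorem hvAux_filter (l p : List Char) :
    ((PySem.List.enumerate l (p.length : Int)).filter
      (fun q => (PySem.List.slice (p ++ l) none (some q.1)).count q.2 == 1)).map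
      (fun q => q.2) = hvAux p l := by
  induction l generalizing p with
  | nil => simp [PySem.List.enumerate_nil, hvAux]
  | cons c l ih =>
    rw [PySem.List.enumerate_cons]
    have hsl : PySem.List.slice (p ++ c :: l) none (some (p.length : Int)) = p := by
      rw [PySem.List.slice_to_natCast]
      simp
    rw [List.filter_cons]
    have hcast : (p.length : Int) + 1 = ((p ++ [c]).length : Int) := by simp
    have happ : p ++ c :: l = (p ++ [c]) ++ l := by simp
    by_cases hc : p.count c = 1
    · rw [if_pos (by simp [hsl, hc])]
      simp only [List.map_cons, hvAux, if_pos hc]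
      rw [hcast, happ, ih (p ++ [c])]
      simp
    · rw [if_neg (by simp [hsl, hc])]
      simp only [hvAux, if_neg hc, List.nil_append]
      rw [hcast, happ, ih (p ++ [c])]

-- ===== VERDICT (by name: the statement is the Claim_ definition above) =====
theorem get_heavy_spec : Claim_equal_get_heavy := by
  intro s _
  unfold Spec_get_heavy get_heavy get_heavy_alt
  have hA := hvAux_foldl s.toList [] [] [] (by simp) (by simp)
  have hB := hvAux_filter s.toList []
  simp only [List.length_nil, Nat.cast_zero, List.nil_append] at hA hB
  rw [hA, ← hB, List.map_map]
  rfl
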